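-- pv_equiv track=rewrite | github.com/TDTU-K25/calculus | Midterm/midterm.py | req6
-- ===== SOURCE A (Python) =====
-- def req6(message, x, y, z):  ## KHONG XOA
--     Plain_text = message
--
--     f = abs(x**2 - y**2 - z)
--     Secret_key = format(f, "08b")
--
--     Cirpher_text_char_list = []
--
--     for char in Plain_text:
--         ascii_char = ord(char)
--         binary_char = format(ascii_char, "08b")
--         Cirpher_text_char = ''.join([str(int(let1) ^ int(let2)) for let1, let2 in zip(Secret_key, binary_char)])
--         Cirpher_text_char = chr(int(Cirpher_text_char, 2))
--         Cirpher_text_char_list.append(Cirpher_text_char)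
--
--     Cirpher_text = ''.join([str(char) for char in Cirpher_text_char_list])
--
--     return Cirpher_text
-- ===== SOURCE B (Python) =====
-- def req6(message, x, y, z):
--     # Integer XOR on the common leading bit-prefix instead of per-bit string XOR.
--     key = format(abs(x * x - y * y - z), "08b")
--     out = []
--     for char in message:
--         binary_char = format(ord(char), "08b")
--         m = min(len(key), len(binary_char))
--         out.append(chr(int(key[:m], 2) ^ int(binary_char[:m], 2)))
--     return ''.join(out)
-- ===== Notes on version B (the rewrite author's own statement) =====
-- stated objective: faster
-- what changed: Replaces A's per-character inner bit loop (string comprehension XOR-ing digit characters one by one, join, re-parse with int(.,2)) by a single integer XOR of the two bit values truncated to the common prefix length, which reproduces zip's truncation exactly.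
import Mathlib
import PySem

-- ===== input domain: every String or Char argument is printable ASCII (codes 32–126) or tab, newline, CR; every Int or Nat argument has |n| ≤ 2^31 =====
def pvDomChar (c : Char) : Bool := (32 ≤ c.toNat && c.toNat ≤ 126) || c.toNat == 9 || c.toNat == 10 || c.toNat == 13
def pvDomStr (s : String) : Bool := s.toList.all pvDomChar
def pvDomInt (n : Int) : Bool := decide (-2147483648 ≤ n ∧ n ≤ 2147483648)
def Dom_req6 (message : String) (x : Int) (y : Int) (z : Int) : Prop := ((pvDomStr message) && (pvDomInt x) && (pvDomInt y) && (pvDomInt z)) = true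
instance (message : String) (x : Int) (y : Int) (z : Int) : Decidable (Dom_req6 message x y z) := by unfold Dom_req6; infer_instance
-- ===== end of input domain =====

-- B replaces A's per-bit string-comprehension XOR by one integer XOR of the two
-- truncated bit values per character (same truncation as zip); a timing run measured B faster by a constant factor.

-- ===== SHARED HELPERS (Python built-ins both versions call) =====
-- format(n, 'b') for n ≥ 0: binary digits, most significant first (exact).
def pvBinRec (n : Nat) : List Char :=
  if h : n < 2 then [Char.ofNat (48 + n)]
  else pvBinRec (n / 2) ++ [Char.ofNat (48 + n % 2)]
  decreasing_by exact Nat.div_lt_self (by omega) (by omega)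

-- format(n, '08b') for n ≥ 0: zero-padded on the left to width 8 (exact).
def pvBin8 (n : Nat) : List Char :=
  List.replicate (8 - (pvBinRec n).length) '0' ++ pvBinRec n

-- int(s, 2) for a string of '0'/'1' digits (exact on such strings).
def pvBits (l : List Char) : Nat := l.foldl (fun a c => 2 * a + (c.toNat - 48)) 0

-- ===== PORT A =====
def req6 (message : String) (x : Int) (y : Int) (z : Int) : String :=
  let f : Nat := (x ^ 2 - y ^ 2 - z).natAbs          -- abs(x**2 - y**2 - z)
  let secretKey : List Char := pvBin8 f
  let cs : List Char := message.toList.map (fun ch =>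
    let binaryChar : List Char := pvBin8 ch.toNat
    -- ''.join([str(int(let1) ^ int(let2)) for let1, let2 in zip(Secret_key, binary_char)])
    let xorStr : List Char := (secretKey.zip binaryChar).map
      (fun p => Char.ofNat (48 + ((p.1.toNat - 48) ^^^ (p.2.toNat - 48))))
    Char.ofNat (pvBits xorStr))                       -- chr(int(…, 2))
  String.ofList cs                                    -- ''.join(list)

-- ===== PORT B =====
def req6_alt (message : String) (x : Int) (y : Int) (z : Int) : String :=
  let key : List Char := pvBin8 (x * x - y * y - z).natAbs
  let out : List Char := message.toList.map (fun ch =>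
    let binaryChar : List Char := pvBin8 ch.toNat
    let m : Nat := min key.length binaryChar.length
    -- chr(int(key[:m], 2) ^ int(binary_char[:m], 2)); key[:m] with 0 ≤ m is take m (exact)
    Char.ofNat (pvBits (key.take m) ^^^ pvBits (binaryChar.take m)))
  String.ofList out

-- ===== PRECONDITION & SPEC =====
def Spec_req6 (message : String) (x : Int) (y : Int) (z : Int) (out : String) : Prop := out = req6_alt message x y z
instance (message : String) (x : Int) (y : Int) (z : Int) (out : String) : Decidable (Spec_req6 message x y z out) := by unfold Spec_req6; infer_instance

-- ===== CLAIM (what is proved, stated in full; the proofs are below) =====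
def Claim_equal_req6 : Prop := ∀ (message : String) (x : Int) (y : Int) (z : Int), Dom_req6 message x y z → Spec_req6 message x y z (req6 message x y z)

-- ===== LEMMAS AND PROOFS =====

-- Every digit produced by format(·, 'b') is '0' or '1'.
lemma pvBinRec_bits (n : Nat) : ∀ c ∈ pvBinRec n, c = '0' ∨ c = '1' := by
  induction n using Nat.strong_induction_on with
  | _ n ih =>
    rw [pvBinRec]
    split
    · rename_i h
      intro c hc
      simp at hc
      subst hc
      interval_cases n
      · exact Or.inl (by decide)
      · exact Or.inr (by decide)
    · rename_i h
      intro c hc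
      rcases List.mem_append.1 hc with h1 | h1
      · exact ih (n / 2) (Nat.div_lt_self (by omega) (by omega)) c h1
      · simp at h1
        subst h1
        rcases Nat.mod_two_eq_zero_or_one n with h2 | h2 <;> rw [h2]
        · exact Or.inl (by decide)
        · exact Or.inr (by decide)

lemma pvBin8_bits (n : Nat) : ∀ c ∈ pvBin8 n, c = '0' ∨ c = '1' := by
  intro c hc
  rcases List.mem_append.1 hc with h | h
  · exact Or.inl (List.eq_of_mem_replicate h)
  · exact pvBinRec_bits n c h

lemma pvBin8_length_ge (n : Nat) : 8 ≤ (pvBin8 n).length := by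
  simp [pvBin8]; omega

lemma pvBinRec_length_le : ∀ (k n : Nat), 1 ≤ k → n < 2 ^ k → (pvBinRec n).length ≤ k := by
  intro k
  induction k with
  | zero => omega
  | succ k ih =>
    intro n _ hn
    rw [pvBinRec]
    split
    · simp
    · rename_i h
      have hk : 1 ≤ k := by
        rcases Nat.eq_zero_or_pos k with h0 | h0
        · subst h0; norm_num at hn; omega
        · exact h0
      have hlt : n < 2 * 2 ^ k := by rw [Nat.pow_succ] at hn; omega
      have : (pvBinRec (n / 2)).length ≤ k := ih (n / 2) hk (Nat.div_lt_of_lt_mul hlt)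
      simp
      omega

lemma pvBin8_length_eq {n : Nat} (hn : n < 256) : (pvBin8 n).length = 8 := by
  have := pvBinRec_length_le 8 n (by omega) ((by norm_num : (2:Nat) ^ 8 = 256) ▸ hn)
  simp [pvBin8]; omega

-- (2*a₁+b₁) ^^^ (2*a₂+b₂) = 2*(a₁^^^a₂) + (b₁^^^b₂) for single bits b₁, b₂.
lemma two_mul_add_xor (a1 a2 b1 b2 : Nat) (h1 : b1 < 2) (h2 : b2 < 2) :
    (2 * a1 + b1) ^^^ (2 * a2 + b2) = 2 * (a1 ^^^ a2) + (b1 ^^^ b2) := by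
  interval_cases b1 <;> interval_cases b2
  · simpa [Nat.bit_val] using Nat.xor_bit false a1 false a2
  · simpa [Nat.bit_val] using Nat.xor_bit false a1 true a2
  · simpa [Nat.bit_val] using Nat.xor_bit true a1 false a2
  · simpa [Nat.bit_val] using Nat.xor_bit true a1 true a2

-- Core invariant: folding the per-bit XOR string equals XOR of the two folds.
lemma foldl_zip_xor : ∀ (l1 l2 : List Char), l1.length = l2.length →
    (∀ c ∈ l1, c = '0' ∨ c = '1') → (∀ c ∈ l2, c = '0' ∨ c = '1') →
    ∀ a1 a2 : Nat,
    ((l1.zip l2).map (fun p => Char.ofNat (48 + ((p.1.toNat - 48) ^^^ (p.2.toNat - 48))))).foldl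
        (fun a c => 2 * a + (c.toNat - 48)) (a1 ^^^ a2)
      = (l1.foldl (fun a c => 2 * a + (c.toNat - 48)) a1) ^^^
        (l2.foldl (fun a c => 2 * a + (c.toNat - 48)) a2) := by
  intro l1
  induction l1 with
  | nil => intro l2 hlen _ _ a1 a2; simp [(List.length_eq_zero_iff.1 hlen.symm)]
  | cons c1 t1 ih =>
    intro l2 hlen hb1 hb2 a1 a2
    cases l2 with
    | nil => simp at hlen
    | cons c2 t2 =>
      have hc1 := hb1 c1 (List.mem_cons_self)
      have hc2 := hb2 c2 (List.mem_cons_self)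
      have hb1' : c1.toNat - 48 < 2 := by rcases hc1 with h | h <;> subst h <;> decide
      have hb2' : c2.toNat - 48 < 2 := by rcases hc2 with h | h <;> subst h <;> decide
      have hv : (Char.ofNat (48 + ((c1.toNat - 48) ^^^ (c2.toNat - 48)))).toNat - 48
          = (c1.toNat - 48) ^^^ (c2.toNat - 48) := by
        rcases hc1 with h | h <;> rcases hc2 with h' | h' <;> subst h <;> subst h' <;> decide
      simp only [List.zip_cons_cons, List.map_cons, List.foldl_cons, hv]
      rw [← two_mul_add_xor a1 a2 _ _ hb1' hb2',
        ih t2 (by simpa using hlen) (fun c hc => hb1 c (List.mem_cons_of_mem _ hc))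
          (fun c hc => hb2 c (List.mem_cons_of_mem _ hc))]

-- zip truncates to the shorter list: zip l1 l2 = zip (l1.take len l2) l2 when l2 is shorter.
lemma zip_take_left (l1 l2 : List Char) : l1.zip l2 = (l1.take l2.length).zip l2 := by
  induction l1 generalizing l2 with
  | nil => simp
  | cons c t ih =>
    cases l2 with
    | nil => simp
    | cons c2 t2 => simp [ih t2]

lemma per_char_eq (key bc : List Char) (hkey : ∀ c ∈ key, c = '0' ∨ c = '1')
    (hbc : ∀ c ∈ bc, c = '0' ∨ c = '1') (hk8 : 8 ≤ key.length) (hb8 : bc.length = 8) :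
    pvBits ((key.zip bc).map (fun p => Char.ofNat (48 + ((p.1.toNat - 48) ^^^ (p.2.toNat - 48)))))
      = pvBits (key.take (min key.length bc.length)) ^^^ pvBits (bc.take (min key.length bc.length)) := by
  have hmin : min key.length bc.length = 8 := by omega
  rw [hmin]
  have htake : bc.take 8 = bc := by rw [← hb8]; exact List.take_length
  rw [htake]
  have hz : key.zip bc = (key.take 8).zip bc := by
    have := zip_take_left key bc
    rwa [hb8] at this
  rw [hz]
  have hlen : (key.take 8).length = bc.length := by simp; omega
  have := foldl_zip_xor (key.take 8) bc hlen
    (fun c hc => hkey c (List.mem_of_mem_take hc)) hbc 0 0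
  simpa [pvBits] using this

-- ===== VERDICT (by name: the statement is the Claim_ definition above) =====
theorem req6_spec : Claim_equal_req6 := by
  intro message x y z hdom
  unfold Spec_req6 req6 req6_alt
  have hf : (x ^ 2 - y ^ 2 - z).natAbs = (x * x - y * y - z).natAbs := by ring_nf
  rw [hf]
  have hall : ∀ ch ∈ message.toList, pvDomChar ch = true := by
    have : pvDomStr message = true := by
      unfold Dom_req6 at hdom; simp at hdom; tauto
    simpa [pvDomStr, List.all_eq_true] using this
  refine congrArg String.ofList (List.map_congr_left ?_)
  intro ch hch
  have hc : ch.toNat < 256 := by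
    have := hall ch hch
    simp [pvDomChar] at this
    omega
  exact congrArg Char.ofNat (per_char_eq _ _ (pvBin8_bits _) (pvBin8_bits _)
    (pvBin8_length_ge _) (pvBin8_length_eq hc))
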